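-- pv_equiv track=rewrite | github.com/bdkcspronk/Computational-Physics | 3D Ising Model App/ising_plots.py | split_by_step_resets
-- ===== SOURCE A (Python) =====
-- def split_by_step_resets(snapshots):
--     """
--     Split snapshots into segments when step counter resets or decreases.
--     This avoids connecting separate runs in line plots.
--     """
--     segments = []
--     current = []
--     last_step = None
--     for snap in snapshots:
--         step = snap.get("step")
--         if last_step is not None and step is not None and step <= last_step:
--             if current:
--                 segments.append(current)
--             current = []
--         current.append(snap)
--         last_step = step
--     if current:
--         segments.append(current)
--     return segments
-- ===== SOURCE B (Python) =====
-- def split_by_step_resets(snapshots):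
--     """
--     Split snapshots into segments when step counter resets or decreases.
--     Index-table approach: one pass records the boundary indices where a new
--     segment starts, then the list is sliced at those boundaries.
--     """
--     boundaries = [0]
--     prev = None
--     for i, snap in enumerate(snapshots):
--         step = snap.get("step")
--         if prev is not None and step is not None and step <= prev:
--             boundaries.append(i)
--         prev = step
--     boundaries.append(len(snapshots))
--     return [snapshots[a:b] for a, b in zip(boundaries, boundaries[1:]) if b > a]
-- ===== Notes on version B (the rewrite author's own statement) =====
-- stated objective: alternative
-- what changed: Replaces A's grow-and-flush segment accumulator with two passes: one pass records the boundary indices where a reset occurs, then the snapshot list is sliced at consecutive boundary pairs.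
import Mathlib
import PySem

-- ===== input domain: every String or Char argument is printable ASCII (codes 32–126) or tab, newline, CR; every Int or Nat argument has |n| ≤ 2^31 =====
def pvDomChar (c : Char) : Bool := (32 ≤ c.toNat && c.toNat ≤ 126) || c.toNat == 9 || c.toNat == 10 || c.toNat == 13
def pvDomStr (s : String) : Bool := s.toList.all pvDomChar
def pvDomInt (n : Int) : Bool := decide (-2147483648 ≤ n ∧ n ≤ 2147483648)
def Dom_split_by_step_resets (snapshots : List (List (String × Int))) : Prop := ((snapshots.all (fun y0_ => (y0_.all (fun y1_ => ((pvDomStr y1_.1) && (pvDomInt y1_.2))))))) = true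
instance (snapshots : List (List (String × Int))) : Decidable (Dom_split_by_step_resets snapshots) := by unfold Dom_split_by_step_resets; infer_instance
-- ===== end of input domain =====

-- B replaces A's grow-and-flush accumulator with a boundary-index pass followed by slicing; same O(n) cost, different decomposition.


-- ===== PORT A =====
-- snap.get("step") (a dict is an association list; lookup = first match, as PySem.Dict)
def pvGet (snap : List (String × Int)) : Option Int := (PySem.Dict.mk snap).get? "step"

-- 'last_step is not None and step is not None and step <= last_step'
def pvReset (last step : Option Int) : Bool :=
  last.isSome && step.isSome && decide (step.getD 0 ≤ last.getD 0)

-- the loop body of A: state = (segments, current, last_step)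
def pvStepA (st : List (List (List (String × Int))) × List (List (String × Int)) × Option Int)
    (snap : List (String × Int)) :
    List (List (List (String × Int))) × List (List (String × Int)) × Option Int :=
  let step := pvGet snap
  if pvReset st.2.2 step then
    ((if st.2.1 ≠ [] then st.1 ++ [st.2.1] else st.1), [snap], step)
  else
    (st.1, st.2.1 ++ [snap], step)

def split_by_step_resets (snapshots : List (List (String × Int))) : List (List (List (String × Int))) :=
  let st := snapshots.foldl pvStepA ([], [], none)
  if st.2.1 ≠ [] then st.1 ++ [st.2.1] else st.1

-- ===== PORT B =====
-- the loop body of B: state = (boundaries, prev)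
def pvStepB (st : List Int × Option Int) (p : Int × List (String × Int)) : List Int × Option Int :=
  let step := pvGet p.2
  ((if pvReset st.2 step then st.1 ++ [p.1] else st.1), step)

def split_by_step_resets_alt (snapshots : List (List (String × Int))) : List (List (List (String × Int))) :=
  let st := (PySem.List.enumerate snapshots 0).foldl pvStepB ([0], none)
  let boundaries := st.1 ++ [(snapshots.length : Int)]
  -- zip(boundaries, boundaries[1:]): boundaries[1:] is boundaries.tail (PySem.List.slice_from_one)
  ((boundaries.zip boundaries.tail).filter (fun p => decide (p.1 < p.2))).map
    (fun p => PySem.List.slice snapshots (some p.1) (some p.2))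

-- ===== PRECONDITION & SPEC =====
def Spec_split_by_step_resets (snapshots : List (List (String × Int))) (out : List (List (List (String × Int)))) : Prop := out = split_by_step_resets_alt snapshots
instance (snapshots : List (List (String × Int))) (out : List (List (List (String × Int)))) : Decidable (Spec_split_by_step_resets snapshots out) := by unfold Spec_split_by_step_resets; infer_instance

-- ===== CLAIM (what is proved, stated in full; the proofs are below) =====
def Claim_equal_split_by_step_resets : Prop := ∀ (snapshots : List (List (String × Int))), Dom_split_by_step_resets snapshots → Spec_split_by_step_resets snapshots (split_by_step_resets snapshots)

-- ===== LEMMAS AND PROOFS =====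

-- prepend 'cur' onto the first segment ([cur] if no segments)
def pvGlue (cur : List (List (String × Int))) : List (List (List (String × Int))) → List (List (List (String × Int)))
  | [] => [cur]
  | seg :: more => (cur ++ seg) :: more

-- reference segmentation: first segment is the continuation of the current one
def pvSpec (prev : Option Int) : List (List (String × Int)) → List (List (List (String × Int)))
  | [] => [[]]
  | t :: rest =>
    if pvReset prev (pvGet t) then [] :: pvGlue [t] (pvSpec (pvGet t) rest)
    else pvGlue [t] (pvSpec (pvGet t) rest)

-- boundary indices produced by B's pass, starting at index i with previous step prev
def pvBIdx (i : Int) (prev : Option Int) : List (List (String × Int)) → List Int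
  | [] => []
  | t :: rest => (if pvReset prev (pvGet t) then [i] else []) ++ pvBIdx (i + 1) (pvGet t) rest

-- slice at consecutive boundaries
def pvChop (snaps : List (List (String × Int))) (a : Int) : List Int → List (List (List (String × Int)))
  | [] => []
  | b :: bs => PySem.List.slice snaps (some a) (some b) :: pvChop snaps b bs

theorem pvSpec_ne_nil (prev : Option Int) (l : List (List (String × Int))) : pvSpec prev l ≠ [] := by
  cases l with
  | nil => simp [pvSpec]
  | cons t rest =>
    simp only [pvSpec]
    split
    · simp
    · cases pvSpec (pvGet t) rest <;> simp [pvGlue]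

theorem pvGlue_glue (cur : List (List (String × Int))) (t : List (String × Int))
    (l : List (List (List (String × Int)))) :
    pvGlue cur (pvGlue [t] l) = pvGlue (cur ++ [t]) l := by
  cases l <;> simp [pvGlue]

theorem A_loop : ∀ (rest : List (List (String × Int)))
    (segs : List (List (List (String × Int)))) (cur : List (List (String × Int))) (last : Option Int),
    cur ≠ [] →
    (let st := rest.foldl pvStepA (segs, cur, last);
     if st.2.1 ≠ [] then st.1 ++ [st.2.1] else st.1) = segs ++ pvGlue cur (pvSpec last rest) := by
  intro rest
  induction rest with
  | nil =>
    intro segs cur last hcur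
    simp [pvSpec, pvGlue, hcur]
  | cons t rest ih =>
    intro segs cur last hcur
    simp only [List.foldl_cons]
    by_cases hr : pvReset last (pvGet t) = true
    · have hstep : pvStepA (segs, cur, last) t = (segs ++ [cur], [t], pvGet t) := by
        simp [pvStepA, hr, hcur]
      rw [hstep, ih (segs ++ [cur]) [t] (pvGet t) (by simp)]
      simp [pvSpec, hr, pvGlue, List.append_assoc]
    · have hstep : pvStepA (segs, cur, last) t = (segs, cur ++ [t], pvGet t) := by
        simp [pvStepA, hr]
      rw [hstep, ih segs (cur ++ [t]) (pvGet t) (by simp)]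
      simp [pvSpec, hr, pvGlue_glue]

theorem B_fold : ∀ (rest : List (List (String × Int))) (i : Int) (acc : List Int) (prev : Option Int),
    ((PySem.List.enumerate rest i).foldl pvStepB (acc, prev)).1 = acc ++ pvBIdx i prev rest := by
  intro rest
  induction rest with
  | nil => intro i acc prev; simp [PySem.List.enumerate_nil, pvBIdx]
  | cons t rest ih =>
    intro i acc prev
    rw [PySem.List.enumerate_cons]
    simp only [List.foldl_cons]
    by_cases hr : pvReset prev (pvGet t) = true
    · have : pvStepB (acc, prev) (i, t) = (acc ++ [i], pvGet t) := by simp [pvStepB, hr]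
      rw [this, ih]
      simp [pvBIdx, hr]
    · have : pvStepB (acc, prev) (i, t) = (acc, pvGet t) := by simp [pvStepB, hr]
      rw [this, ih]
      simp [pvBIdx, hr]

theorem chain_bIdx : ∀ (rest : List (List (String × Int))) (j : Int) (prev : Option Int) (a : Int),
    a < j → List.IsChain (· < ·) (a :: (pvBIdx j prev rest ++ [j + rest.length])) := by
  intro rest
  induction rest with
  | nil => intro j prev a h; simpa [pvBIdx, List.isChain_pair] using h
  | cons t rest ih =>
    intro j prev a h
    have hl : j + ((t :: rest).length : Int) = (j + 1) + (rest.length : Int) := by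
      push_cast [List.length_cons]; ring
    rw [hl]
    by_cases hr : pvReset prev (pvGet t) = true
    · rw [show pvBIdx j prev (t :: rest) = j :: pvBIdx (j + 1) (pvGet t) rest from by
        simp [pvBIdx, hr]]
      exact List.isChain_cons_cons.mpr ⟨h, ih (j + 1) (pvGet t) j (by omega)⟩
    · rw [show pvBIdx j prev (t :: rest) = pvBIdx (j + 1) (pvGet t) rest from by
        simp [pvBIdx, hr]]
      exact ih (j + 1) (pvGet t) a (by omega)

theorem zipchop (snaps : List (List (String × Int))) :
    ∀ (bs : List Int) (a : Int), List.IsChain (· < ·) (a :: bs) →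
    (((a :: bs).zip (a :: bs).tail).filter (fun p => decide (p.1 < p.2))).map
      (fun p => PySem.List.slice snaps (some p.1) (some p.2)) = pvChop snaps a bs := by
  intro bs
  induction bs with
  | nil => intro a _; simp [pvChop]
  | cons b bs ih =>
    intro a hch
    obtain ⟨hab, hch⟩ := List.isChain_cons_cons.mp hch
    simp only [List.tail_cons, List.zip_cons_cons, List.filter_cons]
    rw [if_pos (by simpa using hab)]
    simp only [List.map_cons, pvChop]
    congr 1
    exact ih b hch

theorem slice_drop_take (snaps : List (List (String × Int))) (a b : Int) (ha : 0 ≤ a) (hb : 0 ≤ b) :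
    PySem.List.slice snaps (some a) (some b) = (snaps.drop a.toNat).take (b.toNat - a.toNat) :=
  PySem.List.slice_toNat snaps ha hb

theorem B_chop : ∀ (rest : List (List (String × Int))) (j : Int) (prev : Option Int)
    (snaps : List (List (String × Int))) (a : Int),
    0 ≤ a → a ≤ j → j.toNat ≤ snaps.length → rest = snaps.drop j.toNat →
    pvChop snaps a (pvBIdx j prev rest ++ [(snaps.length : Int)]) =
      pvGlue (PySem.List.slice snaps (some a) (some j)) (pvSpec prev rest) := by
  intro rest
  induction rest with
  | nil =>
    intro j prev snaps a ha haj hj hrest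
    have hjn : j.toNat = snaps.length := by
      have := congrArg List.length hrest
      simp [List.length_drop] at this
      omega
    have hjint : j = (snaps.length : Int) := by omega
    simp [pvBIdx, pvChop, pvSpec, pvGlue, hjint]
  | cons t rest ih =>
    intro j prev snaps a ha haj hj hrest
    have hjlt : j.toNat < snaps.length := by
      have := congrArg List.length hrest
      simp [List.length_drop] at this
      omega
    have hj1 : (j + 1).toNat = j.toNat + 1 := by omega
    have hrest' : rest = snaps.drop (j + 1).toNat := by
      rw [hj1, ← List.drop_drop]
      rw [← hrest]
      simp
    have hget : snaps[j.toNat]? = some t := by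
      have : (snaps.drop j.toNat)[0]? = some t := by rw [← hrest]; simp
      simpa [List.getElem?_drop] using this
    by_cases hr : pvReset prev (pvGet t) = true
    · rw [show pvBIdx j prev (t :: rest) = j :: pvBIdx (j + 1) (pvGet t) rest from by
        simp [pvBIdx, hr]]
      simp only [List.cons_append, pvChop]
      rw [ih (j + 1) (pvGet t) snaps j (by omega) (by omega) (by omega) hrest']
      have hslice : PySem.List.slice snaps (some j) (some (j + 1)) = [t] := by
        rw [slice_drop_take snaps j (j + 1) (by omega) (by omega), hj1]
        have : j.toNat + 1 - j.toNat = 1 := by omega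
        rw [this, ← hrest]
        simp
      rw [hslice]
      simp only [pvSpec, hr, if_pos]
      cases h : pvSpec (pvGet t) rest with
      | nil => exact absurd h (pvSpec_ne_nil _ _)
      | cons seg more => simp [pvGlue]
    · rw [show pvBIdx j prev (t :: rest) = pvBIdx (j + 1) (pvGet t) rest from by
        simp [pvBIdx, hr]]
      rw [ih (j + 1) (pvGet t) snaps a ha (by omega) (by omega) hrest']
      have hsl : PySem.List.slice snaps (some a) (some (j + 1)) =
          PySem.List.slice snaps (some a) (some j) ++ [t] := by
        rw [slice_drop_take snaps a (j + 1) ha (by omega),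
            slice_drop_take snaps a j ha (by omega), hj1]
        have h1 : j.toNat + 1 - a.toNat = (j.toNat - a.toNat) + 1 := by omega
        rw [h1, List.take_succ]
        congr 1
        have : (snaps.drop a.toNat)[j.toNat - a.toNat]? = some t := by
          rw [List.getElem?_drop]
          have : a.toNat + (j.toNat - a.toNat) = j.toNat := by omega
          rw [this]; exact hget
        simp [this]
      rw [show pvSpec prev (t :: rest) = pvGlue [t] (pvSpec (pvGet t) rest) from by
        simp [pvSpec, hr]]
      rw [pvGlue_glue, ← hsl]

-- ===== VERDICT (by name: the statement is the Claim_ definition above) =====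
theorem split_by_step_resets_spec : Claim_equal_split_by_step_resets := by
  unfold Claim_equal_split_by_step_resets
  intro snaps _
  unfold Spec_split_by_step_resets
  cases snaps with
  | nil => decide
  | cons s rest =>
    -- A side
    have hA : split_by_step_resets (s :: rest) = pvGlue [s] (pvSpec (pvGet s) rest) := by
      unfold split_by_step_resets
      simp only [List.foldl_cons]
      have h0 : pvStepA ([], [], none) s = ([], [s], pvGet s) := by
        simp [pvStepA, pvReset]
      rw [h0]
      simpa using A_loop rest [] [s] (pvGet s) (by simp)
    -- B side
    have hB : split_by_step_resets_alt (s :: rest) = pvGlue [s] (pvSpec (pvGet s) rest) := by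
      unfold split_by_step_resets_alt
      have hfold : ((PySem.List.enumerate (s :: rest) 0).foldl pvStepB ([0], none)).1 =
          [0] ++ pvBIdx 0 none (s :: rest) := B_fold (s :: rest) 0 [0] none
      have hb0 : pvBIdx 0 none (s :: rest) = pvBIdx 1 (pvGet s) rest := by
        simp [pvBIdx, pvReset]
      simp only [hfold, hb0]
      have hn : ((s :: rest).length : Int) = 1 + (rest.length : Int) := by
        push_cast [List.length_cons]; ring
      have hchain : List.IsChain (· < ·) (0 :: (pvBIdx 1 (pvGet s) rest ++ [((s :: rest).length : Int)])) := by
        rw [hn]; exact chain_bIdx rest 1 (pvGet s) 0 (by omega)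
      have hz := zipchop (s :: rest) (pvBIdx 1 (pvGet s) rest ++ [((s :: rest).length : Int)]) 0 hchain
      simp only [List.cons_append, List.nil_append] at hz ⊢
      rw [hz]
      have hc := B_chop rest 1 (pvGet s) (s :: rest) 0 (by omega) (by omega) (by simp) (by simp)
      rw [hc]
      have : PySem.List.slice (s :: rest) (some 0) (some 1) = [s] := by
        rw [slice_drop_take _ 0 1 (by omega) (by omega)]; simp
      rw [this]
    rw [hA, hB]
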